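-- pv_equiv track=rewrite | github.com/xicwang/analysis-framework-with-mixed-MI-and-BNomic-TCGA | bn_net_work_building/jaccard_index.py | find_child_parent
-- ===== SOURCE A (Python) =====
-- def find_child_parent(child_list, whole_list, target):
--     child_parent_list = []
--     child_parent_file = []
--     for item in child_list:
--         for p in whole_list:
--             if item == p[1]:
--                 parent = p[0]
--                 if parent != target:
--                     child_parent_file.append(p[2])
--                     child_parent_list.append(parent)
--     return child_parent_list, child_parent_file
-- ===== SOURCE B (Python) =====
-- def find_child_parent(child_list, whole_list, target):
--     # Index whole_list by the child column once, keeping only non-target parents,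
--     # then answer each child by a single dict lookup.
--     index = {}
--     for p in whole_list:
--         if p[0] != target:
--             index.setdefault(p[1], []).append((p[0], p[2]))
--     child_parent_list = []
--     child_parent_file = []
--     for item in child_list:
--         for parent, f in index.get(item, []):
--             child_parent_list.append(parent)
--             child_parent_file.append(f)
--     return child_parent_list, child_parent_file
-- ===== Notes on version B (the rewrite author's own statement) =====
-- stated objective: faster
-- what changed: Replaces the nested scan of whole_list per child by a dict built in one pass over whole_list (child column -> ordered (parent, file) pairs, target parents filtered out at build time), so each child is answered by a single lookup.
import Mathlib
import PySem

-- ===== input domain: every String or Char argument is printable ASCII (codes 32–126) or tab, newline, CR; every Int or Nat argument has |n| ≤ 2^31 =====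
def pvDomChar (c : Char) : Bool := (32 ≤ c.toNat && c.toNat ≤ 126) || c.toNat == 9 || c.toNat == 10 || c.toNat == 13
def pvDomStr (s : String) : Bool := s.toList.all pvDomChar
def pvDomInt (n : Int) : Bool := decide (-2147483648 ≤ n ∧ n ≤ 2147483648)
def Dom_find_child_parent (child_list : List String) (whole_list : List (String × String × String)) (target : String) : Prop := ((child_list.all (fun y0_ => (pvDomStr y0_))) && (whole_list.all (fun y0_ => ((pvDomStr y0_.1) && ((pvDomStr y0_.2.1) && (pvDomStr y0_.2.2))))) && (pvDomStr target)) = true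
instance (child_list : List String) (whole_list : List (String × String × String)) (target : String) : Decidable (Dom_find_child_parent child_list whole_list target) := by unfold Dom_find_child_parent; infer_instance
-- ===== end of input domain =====

-- B replaces A's nested scan of whole_list per child by a dict index built once (faster, asymptotic).

-- ===== PORT A =====
-- literal port of A: two accumulator lists, nested loops, branches in source order
def find_child_parent (child_list : List String) (whole_list : List (String × String × String)) (target : String) : List String × List String :=
  child_list.foldl
    (fun (acc : List String × List String) item =>
      whole_list.foldl
        (fun (acc : List String × List String) p =>
          if item == p.2.1 then
            let parent := p.1
            if parent != target then (acc.1 ++ [parent], acc.2 ++ [p.2.2])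
            else acc
          else acc)
        acc)
    ([], [])

-- ===== PORT B =====
-- index.setdefault(p[1], []).append((p[0], p[2])) : read current list (default []), append, store back
def fcpIndex (whole_list : List (String × String × String)) (target : String) : PySem.Dict String (List (String × String)) :=
  whole_list.foldl
    (fun (d : PySem.Dict String (List (String × String))) p =>
      if p.1 != target then d.insert p.2.1 (d.getD p.2.1 [] ++ [(p.1, p.2.2)])
      else d)
    PySem.Dict.empty

def find_child_parent_alt (child_list : List String) (whole_list : List (String × String × String)) (target : String) : List String × List String :=
  let index := fcpIndex whole_list target
  child_list.foldl
    (fun (acc : List String × List String) item =>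
      (index.getD item []).foldl
        (fun (acc : List String × List String) pf => (acc.1 ++ [pf.1], acc.2 ++ [pf.2]))
        acc)
    ([], [])

-- ===== PRECONDITION & SPEC =====
def Spec_find_child_parent (child_list : List String) (whole_list : List (String × String × String)) (target : String) (out : List String × List String) : Prop := out = find_child_parent_alt child_list whole_list target
instance (child_list : List String) (whole_list : List (String × String × String)) (target : String) (out : List String × List String) : Decidable (Spec_find_child_parent child_list whole_list target out) := by unfold Spec_find_child_parent; infer_instance

-- ===== CLAIM (what is proved, stated in full; the proofs are below) =====
def Claim_equal_find_child_parent : Prop := ∀ (child_list : List String) (whole_list : List (String × String × String)) (target : String), Dom_find_child_parent child_list whole_list target → Spec_find_child_parent child_list whole_list target (find_child_parent child_list whole_list target)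

-- ===== LEMMAS AND PROOFS =====

-- the (parent, file) pairs that item contributes, in whole_list order
def fcpSel (whole_list : List (String × String × String)) (target : String) (item : String) : List (String × String) :=
  (whole_list.filter (fun p => item == p.2.1 && p.1 != target)).map (fun p => (p.1, p.2.2))

-- A's inner loop over whole_list is the fold of the selected pairs
theorem fcp_inner_A (target item : String) :
    ∀ (wl : List (String × String × String)) (acc : List String × List String),
      wl.foldl
        (fun (acc : List String × List String) p =>
          if item == p.2.1 then
            let parent := p.1
            if parent != target then (acc.1 ++ [parent], acc.2 ++ [p.2.2])
            else acc
          else acc) acc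
      = (fcpSel wl target item).foldl
          (fun (acc : List String × List String) pf => (acc.1 ++ [pf.1], acc.2 ++ [pf.2])) acc := by
  intro wl
  induction wl with
  | nil => intro acc; simp [fcpSel]
  | cons p rest ih =>
    intro acc
    by_cases h1 : (item == p.2.1) = true
    · by_cases h2 : (p.1 != target) = true
      · have hsel : fcpSel (p :: rest) target item = (p.1, p.2.2) :: fcpSel rest target item := by
          simp [fcpSel, h1, h2]
        rw [hsel, List.foldl_cons, List.foldl_cons]
        simp only [h1, h2, if_true]
        exact ih _
      · have hsel : fcpSel (p :: rest) target item = fcpSel rest target item := by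
          have h2' : p.1 = target := by simpa using h2
          simp [fcpSel, h2']
        rw [hsel, List.foldl_cons]
        simp only [h1, h2, if_true]
        exact ih _
    · have hsel : fcpSel (p :: rest) target item = fcpSel rest target item := by
        have h1' : ¬ item = p.2.1 := by simpa using h1
        simp [fcpSel, h1']
      rw [hsel, List.foldl_cons]
      simp only [h1]
      exact ih _

-- the index built by B stores exactly the selected pairs of each item
theorem fcp_index_getD (target item : String) :
    ∀ (wl : List (String × String × String)) (d : PySem.Dict String (List (String × String))),
      (wl.foldl
        (fun (d : PySem.Dict String (List (String × String))) p =>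
          if p.1 != target then d.insert p.2.1 (d.getD p.2.1 [] ++ [(p.1, p.2.2)])
          else d) d).getD item []
      = d.getD item [] ++ fcpSel wl target item := by
  intro wl
  induction wl with
  | nil => intro d; simp [fcpSel]
  | cons p rest ih =>
    intro d
    by_cases h2 : (p.1 != target) = true
    · by_cases h1 : (item == p.2.1) = true
      · have he : item = p.2.1 := by simpa using h1
        simp only [List.foldl_cons, h2, if_true]
        rw [ih]
        simp [fcpSel, h2, he]
      · have hne : item ≠ p.2.1 := by simpa using h1
        simp only [List.foldl_cons, h2, if_true]
        rw [ih]
        simp [fcpSel, PySem.Dict.getD_insert, hne]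
    · have h2' : p.1 = target := by simpa using h2
      simp only [List.foldl_cons, h2]
      rw [ih]
      simp [fcpSel, h2']

theorem fcp_index_sel (wl : List (String × String × String)) (target item : String) :
    (fcpIndex wl target).getD item [] = fcpSel wl target item := by
  unfold fcpIndex
  rw [fcp_index_getD]
  simp [PySem.Dict.getD, PySem.Dict.empty, PySem.Dict.get?]

-- the two outer folds over child_list agree step by step
theorem fcp_fold_eq (whole_list : List (String × String × String)) (target : String) :
    ∀ (cl : List String) (acc : List String × List String),
      cl.foldl
        (fun (acc : List String × List String) item =>
          whole_list.foldl
            (fun (acc : List String × List String) p =>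
              if item == p.2.1 then
                let parent := p.1
                if parent != target then (acc.1 ++ [parent], acc.2 ++ [p.2.2])
                else acc
              else acc) acc) acc
      = cl.foldl
          (fun (acc : List String × List String) item =>
            ((fcpIndex whole_list target).getD item []).foldl
              (fun (acc : List String × List String) pf => (acc.1 ++ [pf.1], acc.2 ++ [pf.2])) acc) acc := by
  intro cl
  induction cl with
  | nil => intro acc; rfl
  | cons item rest ih =>
    intro acc
    rw [List.foldl_cons, List.foldl_cons, fcp_inner_A, ← fcp_index_sel]
    exact ih _

-- ===== VERDICT (by name: the statement is the Claim_ definition above) =====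
theorem find_child_parent_spec : Claim_equal_find_child_parent := by
  intro child_list whole_list target _
  unfold Spec_find_child_parent find_child_parent find_child_parent_alt
  exact fcp_fold_eq whole_list target child_list ([], [])
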